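-- pv_equiv track=rewrite | github.com/DAMG-7245/assignment_4-2 | api/services/chunking.py | chunk_by_semantic_units
-- ===== SOURCE A (Python) =====
-- def chunk_by_fixed_size(text, chunk_size=1000, overlap=200):
--     """Chunk text by fixed size with overlap"""
--     chunks = []
--     start = 0
--
--     while start < len(text):
--         end = min(start + chunk_size, len(text))
--         # Find the nearest period or newline to make chunks end naturally
--         if end < len(text):
--             for marker in ['. ', '.\n', '\n\n', '\n', ' ']:
--                 natural_end = text.rfind(marker, start, end)
--                 if natural_end != -1:
--                     end = natural_end + len(marker)
--                     break
--
--         chunks.append(text[start:end].strip())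
--         start = max(start, end - overlap)
--
--         # Avoid infinite loop for small texts
--         if start >= len(text) or end == len(text):
--             break
--
--     return chunks
--
-- def chunk_by_semantic_units(text):
--     """Chunk text by semantic units (headings, sections, etc.)"""
--     # This is a simplified implementation - in real-world you'd use more complex logic
--     # Look for section headers, bullet points, etc.
--     sections = []
--     current_section = []
--
--     # Split by lines
--     lines = text.split('\n')
--
--     for i, line in enumerate(lines):
--         line = line.strip()
--         if not line:
--             continue
--
--         # Check if line looks like a heading (all caps, ends with :, etc.)
--         is_heading = (line.isupper() or line.endswith(':') or
--                      (len(line) < 100 and i < len(lines)-1 and not lines[i+1].strip()))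
--
--         if is_heading and current_section:
--             # End current section and start a new one
--             sections.append('\n'.join(current_section))
--             current_section = [line]
--         else:
--             current_section.append(line)
--
--     # Add the final section
--     if current_section:
--         sections.append('\n'.join(current_section))
--
--     # Further chunk very long sections
--     chunks = []
--     for section in sections:
--         if len(section) > 1500:
--             chunks.extend(chunk_by_fixed_size(section, 1000, 150))
--         else:
--             chunks.append(section)
--
--     return chunks
-- ===== SOURCE B (Python) =====
-- def chunk_by_fixed_size(text, chunk_size=1000, overlap=200):
--     """Chunk text by fixed size with overlap"""
--     chunks = []
--     start = 0
--
--     while start < len(text):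
--         end = min(start + chunk_size, len(text))
--         # Find the nearest period or newline to make chunks end naturally
--         if end < len(text):
--             for marker in ['. ', '.\n', '\n\n', '\n', ' ']:
--                 natural_end = text.rfind(marker, start, end)
--                 if natural_end != -1:
--                     end = natural_end + len(marker)
--                     break
--
--         chunks.append(text[start:end].strip())
--         start = max(start, end - overlap)
--
--         # Avoid infinite loop for small texts
--         if start >= len(text) or end == len(text):
--             break
--
--     return chunks
--
--
-- def chunk_by_semantic_units(text):
--     """Two-pass version: classify lines first, then split at heading boundaries."""
--     lines = text.split('\n')
--     n = len(lines)
--     # pass 1: every non-empty stripped line, with its heading flag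
--     flagged = []
--     for i, raw in enumerate(lines):
--         s = raw.strip()
--         if s:
--             flagged.append((s, s.isupper() or s.endswith(':')
--                             or (len(s) < 100 and i + 1 < n and not lines[i + 1].strip())))
--     # pass 2: a section starts at the front and before every later heading
--     sections = []
--     k = 0
--     while k < len(flagged):
--         j = k + 1
--         while j < len(flagged) and not flagged[j][1]:
--             j += 1
--         sections.append('\n'.join(s for s, _ in flagged[k:j]))
--         k = j
--     # unchanged long-section split
--     chunks = []
--     for section in sections:
--         if len(section) > 1500:
--             chunks.extend(chunk_by_fixed_size(section, 1000, 150))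
--         else:
--             chunks.append(section)
--     return chunks
-- ===== Notes on version B (the rewrite author's own statement) =====
-- stated objective: alternative
-- what changed: Replaced A's single fused accumulate-and-flush loop by two separate passes: first classify every non-empty stripped line into (line, is_heading) pairs, then split that flagged list into sections at every later heading; the long-section split is unchanged.
import Mathlib
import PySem

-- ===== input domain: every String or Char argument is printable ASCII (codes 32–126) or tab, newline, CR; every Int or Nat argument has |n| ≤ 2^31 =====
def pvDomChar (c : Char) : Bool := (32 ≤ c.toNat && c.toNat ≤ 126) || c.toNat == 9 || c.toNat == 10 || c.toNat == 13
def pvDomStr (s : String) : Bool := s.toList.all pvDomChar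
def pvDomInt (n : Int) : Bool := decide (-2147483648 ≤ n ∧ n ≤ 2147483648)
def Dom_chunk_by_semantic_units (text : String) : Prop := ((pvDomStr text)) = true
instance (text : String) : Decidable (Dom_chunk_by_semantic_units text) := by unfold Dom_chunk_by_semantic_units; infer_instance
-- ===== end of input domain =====

-- B replaces A's fused accumulate-and-flush loop by two passes (classify lines, then split at headings); alternative decomposition, same cost.
-- Python str.isupper() on the ASCII domain: at least one letter and no lowercase letter (hand-ported; exact on ASCII).
def pyStrIsupper (s : String) : Bool :=
  s.toList.any (fun c => PySem.Chars.isalpha c) && s.toList.all (fun c => !(PySem.Chars.islower c))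

-- shared module helper chunk_by_fixed_size (A and B call it unchanged); the for-marker/break loop:
def findNaturalEnd (text : String) (start end0 : Int) : List String → Int
  | [] => end0
  | m :: ms =>
    let ne := PySem.Str.rfindFrom text m start (some end0)
    if ne ≠ -1 then ne + (PySem.Str.len m : Int) else findNaturalEnd text start end0 ms

-- the while loop, with fuel; each non-final Python iteration strictly increases start (else Python
-- itself never terminates), so fuel (len text + 2) covers every terminating Python run.
def chunkFixedLoop (fuel : Nat) (text : String) (chunk_size overlap : Int)
    (start : Int) (chunks : List String) : List String :=
  match fuel with
  | 0 => chunks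
  | fuel + 1 =>
    if start < (PySem.Str.len text : Int) then
      let tlen : Int := PySem.Str.len text
      let end0 := min (start + chunk_size) tlen
      let e := if end0 < tlen then findNaturalEnd text start end0 [". ", ".\n", "\n\n", "\n", " "] else end0
      let chunks := chunks ++ [PySem.Str.strip (PySem.Str.slice text (some start) (some e))]
      let start := max start (e - overlap)
      if start ≥ tlen || e == tlen then chunks
      else chunkFixedLoop fuel text chunk_size overlap start chunks
    else chunks

def chunk_by_fixed_size (text : String) (chunk_size overlap : Int) : List String :=
  chunkFixedLoop ((PySem.Str.len text).toNat + 2) text chunk_size overlap 0 []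

-- ===== PORT A =====
def chunk_by_semantic_units (text : String) : List String :=
  let lines := (PySem.Str.split? text "\n").getD []  -- sep "\n" ≠ "", so split? is always some
  let res := (PySem.List.enumerate lines 0).foldl
    (fun (st : List String × List String) p =>
      let line := PySem.Str.strip p.2
      if line = "" then st
      else
        let is_heading := pyStrIsupper line || PySem.Str.endswith line ":" ||
          (decide (PySem.Str.len line < 100) && decide (p.1 < (lines.length : Int) - 1) &&
            (PySem.Str.strip ((PySem.List.pyGet? lines (p.1 + 1)).getD "") == ""))
        if is_heading && !st.2.isEmpty then (st.1 ++ [PySem.Str.join "\n" st.2], [line])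
        else (st.1, st.2 ++ [line]))
    ([], [])
  let sections := if res.2.isEmpty then res.1 else res.1 ++ [PySem.Str.join "\n" res.2]
  sections.foldl (fun chunks sec =>
    if 1500 < PySem.Str.len sec then chunks ++ chunk_by_fixed_size sec 1000 150
    else chunks ++ [sec]) []

-- ===== PORT B =====
-- the outer/inner while loops of B's pass 2: head line plus the following non-headings form a section
def altGroups : List (String × Bool) → List String
  | [] => []
  | p :: rest =>
    PySem.Str.join "\n" (p.1 :: (rest.takeWhile (fun q => !q.2)).map Prod.fst)
      :: altGroups (rest.dropWhile (fun q => !q.2))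
termination_by l => l.length
decreasing_by simpa using Nat.lt_succ_of_le (List.length_dropWhile_le _ _)

def chunk_by_semantic_units_alt (text : String) : List String :=
  let lines := (PySem.Str.split? text "\n").getD []  -- sep "\n" ≠ "", so split? is always some
  let flagged := (PySem.List.enumerate lines 0).filterMap (fun p =>
      let s := PySem.Str.strip p.2
      if s = "" then none
      else some (s, pyStrIsupper s || PySem.Str.endswith s ":" ||
        (decide (PySem.Str.len s < 100) && decide (p.1 + 1 < (lines.length : Int)) &&
          (PySem.Str.strip ((PySem.List.pyGet? lines (p.1 + 1)).getD "") == ""))))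
  let sections := altGroups flagged
  sections.foldl (fun chunks sec =>
    if 1500 < PySem.Str.len sec then chunks ++ chunk_by_fixed_size sec 1000 150
    else chunks ++ [sec]) []

-- ===== PRECONDITION & SPEC =====
def Spec_chunk_by_semantic_units (text : String) (out : List String) : Prop := out = chunk_by_semantic_units_alt text
instance (text : String) (out : List String) : Decidable (Spec_chunk_by_semantic_units text out) := by unfold Spec_chunk_by_semantic_units; infer_instance

-- ===== CLAIM (what is proved, stated in full; the proofs are below) =====
def Claim_equal_chunk_by_semantic_units : Prop := ∀ (text : String), Dom_chunk_by_semantic_units text → Spec_chunk_by_semantic_units text (chunk_by_semantic_units text)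

-- ===== LEMMAS AND PROOFS =====

-- the grouping step of A's fused loop, abstracted over the already-classified pair
def stepS (st : List String × List String) (q : String × Bool) : List String × List String :=
  if q.2 && !st.2.isEmpty then (st.1 ++ [PySem.Str.join "\n" st.2], [q.1])
  else (st.1, st.2 ++ [q.1])

theorem foldl_eq_filterMap_foldl {α β σ : Type} (f : α → Option β) (g : σ → β → σ)
    (gA : σ → α → σ) (h : ∀ st a, gA st a = match f a with | none => st | some b => g st b) :
    ∀ (l : List α) (st : σ), l.foldl gA st = (l.filterMap f).foldl g st := by
  intro l
  induction l with
  | nil => intro st; rfl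
  | cons a l ih =>
    intro st
    simp only [List.foldl_cons, List.filterMap_cons, h st a]
    cases f a with
    | none => exact ih st
    | some b => simp [ih]

theorem stepS_foldl_flush (fl : List (String × Bool)) :
    ∀ (secs cur : List String), cur ≠ [] →
    (let r := fl.foldl stepS (secs, cur);
     if r.2.isEmpty then r.1 else r.1 ++ [PySem.Str.join "\n" r.2])
    = secs ++ PySem.Str.join "\n" (cur ++ (fl.takeWhile (fun q => !q.2)).map Prod.fst)
        :: altGroups (fl.dropWhile (fun q => !q.2)) := by
  induction fl with
  | nil =>
    intro secs cur hcur
    simp [altGroups, List.isEmpty_iff, hcur]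
  | cons q t ih =>
    intro secs cur hcur
    rcases q with ⟨s, h⟩
    cases h with
    | false =>
      have := ih secs (cur ++ [s]) (by simp)
      simpa [stepS, List.isEmpty_iff, hcur, List.takeWhile_cons, List.dropWhile_cons,
        List.append_assoc] using this
    | true =>
      have := ih (secs ++ [PySem.Str.join "\n" cur]) [s] (by simp)
      simp only [List.foldl_cons]
      rw [show stepS (secs, cur) (s, true) = (secs ++ [PySem.Str.join "\n" cur], [s]) by
        simp [stepS, hcur]]
      rw [this]
      simp [altGroups, List.append_assoc]

theorem stepS_foldl_groups (fl : List (String × Bool)) :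
    (let r := fl.foldl stepS (([] : List String), ([] : List String));
     if r.2.isEmpty then r.1 else r.1 ++ [PySem.Str.join "\n" r.2]) = altGroups fl := by
  cases fl with
  | nil => simp [altGroups]
  | cons q t =>
    rcases q with ⟨s, h⟩
    simp only [List.foldl_cons]
    rw [show stepS (([] : List String), ([] : List String)) (s, h) = ([], [s]) by
      simp [stepS]]
    rw [stepS_foldl_flush t [] [s] (by simp)]
    cases h <;> simp [altGroups]

-- ===== VERDICT (by name: the statement is the Claim_ definition above) =====
theorem chunk_by_semantic_units_spec : Claim_equal_chunk_by_semantic_units := by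
  intro text _
  unfold Spec_chunk_by_semantic_units chunk_by_semantic_units chunk_by_semantic_units_alt
  set lines := (PySem.Str.split? text "\n").getD [] with hlines
  dsimp only
  congr 1
  rw [foldl_eq_filterMap_foldl
    (fun p : Int × String =>
      let s := PySem.Str.strip p.2
      if s = "" then none
      else some (s, pyStrIsupper s || PySem.Str.endswith s ":" ||
        (decide (PySem.Str.len s < 100) && decide (p.1 + 1 < (lines.length : Int)) &&
          (PySem.Str.strip ((PySem.List.pyGet? lines (p.1 + 1)).getD "") == ""))))
    stepS _
    (by
      intro st p
      by_cases hs : PySem.Str.strip p.2 = ""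
      · simp [hs]
      · simp only [hs, if_false]
        have hd : decide (p.1 < (lines.length : Int) - 1) = decide (p.1 + 1 < (lines.length : Int)) := by
          simp only [decide_eq_decide]; omega
        simp [stepS, hd])]
  exact stepS_foldl_groups _
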